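-- pv_equiv track=rewrite | github.com/VNemchenko/dayz-log-monitor | monitor.py | select_persisted_player_name
-- ===== SOURCE A (Python) =====
-- def is_survivor_name(player_name: str) -> bool:
--     return "survivor" in player_name.casefold()
--
-- def select_persisted_player_name(
--     observed_name: str,
--     player_index: int,
--     players_db: dict[str, dict[str, object]],
-- ) -> str:
--     if is_survivor_name(observed_name):
--         return f"Survivor{player_index}"
--
--     used_names = {
--         str(entry.get("name", "")).strip()
--         for entry in players_db.values()
--         if str(entry.get("name", "")).strip()
--     }
--
--     candidate = observed_name
--     if candidate in used_names:
--         candidate = f"{observed_name}{player_index}"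
--
--     suffix = 2
--     while candidate in used_names:
--         candidate = f"{observed_name}{player_index}_{suffix}"
--         suffix += 1
--
--     return candidate
-- ===== SOURCE B (Python) =====
-- def is_survivor_name(player_name: str) -> bool:
--     return "survivor" in player_name.casefold()
--
-- def select_persisted_player_name(
--     observed_name: str,
--     player_index: int,
--     players_db: dict[str, dict[str, object]],
-- ) -> str:
--     if is_survivor_name(observed_name):
--         return f"Survivor{player_index}"
--
--     used_names = {
--         str(entry.get("name", "")).strip()
--         for entry in players_db.values()
--         if str(entry.get("name", "")).strip()
--     }
--
--     if observed_name not in used_names: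
--         return observed_name
--     indexed = f"{observed_name}{player_index}"
--     if indexed not in used_names:
--         return indexed
--
--     # Instead of trial-and-error over generated candidate strings, project the
--     # taken suffix strings out of the used names once and return the smallest
--     # free suffix >= 2 (one exists in range(2, len(taken) + 3) by pigeonhole).
--     prefix = indexed + "_"
--     taken = {name[len(prefix):] for name in used_names if name.startswith(prefix)}
--     free = min(s for s in range(2, len(taken) + 3) if str(s) not in taken)
--     return f"{prefix}{free}"
-- ===== Notes on version B (the rewrite author's own statement) =====
-- stated objective: alternative
-- what changed: A's mutate-and-retry loop over generated candidate strings is replaced by early returns for the two fixed candidates and, on collision, projecting the taken suffix strings out of the used names once and returning the smallest free suffix >= 2 as the min of the complement of a bounded range (nonempty by pigeonhole).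
import Mathlib
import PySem

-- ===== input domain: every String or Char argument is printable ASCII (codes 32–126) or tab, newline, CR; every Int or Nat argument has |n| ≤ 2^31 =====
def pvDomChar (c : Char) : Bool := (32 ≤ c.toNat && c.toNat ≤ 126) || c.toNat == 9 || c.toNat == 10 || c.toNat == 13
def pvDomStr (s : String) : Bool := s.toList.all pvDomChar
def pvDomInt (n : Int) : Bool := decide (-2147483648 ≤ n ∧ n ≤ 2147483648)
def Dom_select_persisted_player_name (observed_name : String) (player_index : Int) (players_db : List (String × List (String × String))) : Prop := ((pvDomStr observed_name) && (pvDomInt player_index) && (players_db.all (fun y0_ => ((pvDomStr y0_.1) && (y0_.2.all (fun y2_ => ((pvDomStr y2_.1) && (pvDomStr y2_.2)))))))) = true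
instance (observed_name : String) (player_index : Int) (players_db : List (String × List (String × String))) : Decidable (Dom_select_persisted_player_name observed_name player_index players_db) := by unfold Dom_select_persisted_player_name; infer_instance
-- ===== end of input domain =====

-- B replaces A's trial-and-error loop over generated candidate strings by projecting the taken
-- suffix strings out of the used names once and returning the smallest free suffix ≥ 2 as the
-- min of the complement (objective: alternative algorithm, same cost).

-- ===== PORT A =====
-- helper is_survivor_name; str.casefold() ported as Str.lower — exact on the ASCII domain
def pvIsSurvivorName (player_name : String) : Bool :=
  PySem.Str.isIn "survivor" (PySem.Str.lower player_name)

-- the set comprehension { str(entry.get("name","")).strip() for entry in players_db.values() if ... }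
-- (both Pythons build it with the identical comprehension, so the helper is shared)
def pvUsedNames (players_db : List (String × List (String × String))) : PySem.Set String :=
  PySem.Set.ofList
    (((players_db.map (fun p => p.2)).map
        (fun entry => PySem.Str.strip (PySem.Dict.getD (PySem.Dict.mk entry) "name" ""))).filter
      (fun s => s != ""))

-- A's while loop, fueled with used.length + 2: the loop provably stops before the fuel runs
-- out (pigeonhole over the pairwise-distinct suffixed candidates; lemmas below), so the
-- fuel-out branch is never taken.
def pvLoopA (used : PySem.Set String) (observed_name : String) (player_index : Int) :
    String → Int → Nat → String
  | cand, _, 0 => cand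
  | cand, suffix, fuel + 1 =>
      if PySem.Set.contains used cand then
        pvLoopA used observed_name player_index
          (observed_name ++ PySem.Int.toStr player_index ++ "_" ++ PySem.Int.toStr suffix)
          (suffix + 1) fuel
      else cand

def select_persisted_player_name (observed_name : String) (player_index : Int) (players_db : List (String × List (String × String))) : String :=
  if pvIsSurvivorName observed_name then "Survivor" ++ PySem.Int.toStr player_index
  else
    let used := pvUsedNames players_db
    let cand :=
      if PySem.Set.contains used observed_name then
        observed_name ++ PySem.Int.toStr player_index
      else observed_name
    pvLoopA used observed_name player_index cand 2 (used.length + 2)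

-- ===== PORT B =====
-- taken = {name[len(prefix):] for name in used_names if name.startswith(prefix)}
-- (builds a set from a set — order-independent, so iterating the Lean Set's list is exact)
def pvTakenSuffixes (used : PySem.Set String) (pre : String) : PySem.Set String :=
  PySem.Set.ofList
    ((used.filter (fun n => PySem.Str.startswith n pre)).map
      (fun n => PySem.Str.slice n (some (PySem.Str.len pre)) none))

def select_persisted_player_name_alt (observed_name : String) (player_index : Int) (players_db : List (String × List (String × String))) : String :=
  if pvIsSurvivorName observed_name then "Survivor" ++ PySem.Int.toStr player_index
  else
    let used := pvUsedNames players_db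
    if !(PySem.Set.contains used observed_name) then observed_name
    else
      let indexed := observed_name ++ PySem.Int.toStr player_index
      if !(PySem.Set.contains used indexed) then indexed
      else
        let pre := indexed ++ "_"
        let taken := pvTakenSuffixes used pre
        -- min(s for s in range(2, len(taken) + 3) if str(s) not in taken); the generator is
        -- nonempty by pigeonhole (proved below), so Python's min never raises and getD 0 is dead
        let free :=
          (PySem.List.min?
            ((PySem.List.pyRange 2 (PySem.Set.len taken + 3) 1).filter
              (fun s => !(PySem.Set.contains taken (PySem.Int.toStr s))))
            (fun x => x)).getD 0
        pre ++ PySem.Int.toStr free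

-- ===== PRECONDITION & SPEC =====
def Spec_select_persisted_player_name (observed_name : String) (player_index : Int) (players_db : List (String × List (String × String))) (out : String) : Prop := out = select_persisted_player_name_alt observed_name player_index players_db
instance (observed_name : String) (player_index : Int) (players_db : List (String × List (String × String))) (out : String) : Decidable (Spec_select_persisted_player_name observed_name player_index players_db out) := by unfold Spec_select_persisted_player_name; infer_instance

-- ===== CLAIM (what is proved, stated in full; the proofs are below) =====
def Claim_equal_select_persisted_player_name : Prop := ∀ (observed_name : String) (player_index : Int) (players_db : List (String × List (String × String))), Dom_select_persisted_player_name observed_name player_index players_db → Spec_select_persisted_player_name observed_name player_index players_db (select_persisted_player_name observed_name player_index players_db)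

-- ===== LEMMAS AND PROOFS =====

lemma pv_digitChar_inj (a b : Nat) (ha : a < 10) (hb : b < 10)
    (h : Nat.digitChar a = Nat.digitChar b) : a = b := by
  interval_cases a <;> interval_cases b <;> revert h <;> decide
lemma pv_toDigits10_ne_nil (n : Nat) : Nat.toDigits 10 n ≠ [] := by
  rw [Nat.toDigits_eq_if (by norm_num)]
  split <;> simp
lemma pv_toDigits10_inj : ∀ a b : Nat, Nat.toDigits 10 a = Nat.toDigits 10 b → a = b := by
  intro a
  induction a using Nat.strong_induction_on with
  | _ a ih =>
    intro b h
    rw [Nat.toDigits_eq_if (n := a) (by norm_num), Nat.toDigits_eq_if (n := b) (by norm_num)] at h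
    split_ifs at h with h1 h2 h2
    · simpa using pv_digitChar_inj a b h1 h2 (by simpa using h)
    · rcases List.exists_cons_of_ne_nil (pv_toDigits10_ne_nil (b / 10)) with ⟨x, xs, e⟩
      rw [e] at h
      simp at h
    · rcases List.exists_cons_of_ne_nil (pv_toDigits10_ne_nil (a / 10)) with ⟨x, xs, e⟩
      rw [e] at h
      simp at h
    · have hd : Nat.toDigits 10 (a / 10) = Nat.toDigits 10 (b / 10) := by
        have := congrArg List.dropLast h
        simpa [List.dropLast_concat] using this
      have hl : Nat.digitChar (a % 10) = Nat.digitChar (b % 10) := by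
        have := congrArg List.getLast? h
        simpa [List.getLast?_concat] using this
      have hdiv : a / 10 = b / 10 :=
        ih (a / 10) (Nat.div_lt_self (by omega) (by norm_num)) _ hd
      have hmod : a % 10 = b % 10 :=
        pv_digitChar_inj _ _ (Nat.mod_lt _ (by norm_num)) (Nat.mod_lt _ (by norm_num)) hl
      omega
lemma pv_toStr_inj_nonneg (x y : Int) (hx : 0 ≤ x) (hy : 0 ≤ y)
    (h : PySem.Int.toStr x = PySem.Int.toStr y) : x = y := by
  have h2 : PySem.Int.toChars x = PySem.Int.toChars y := by
    have := congrArg String.toList h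
    simpa [PySem.Int.toList_toStr] using this
  unfold PySem.Int.toChars at h2
  rw [if_neg (by omega), if_neg (by omega)] at h2
  have := pv_toDigits10_inj _ _ h2
  omega

-- there is a free suffix among 2 .. taken.length + 2 (pigeonhole over a Nodup list)
lemma pv_exists_free (taken : List String) :
    ∃ k : Nat, k ≤ taken.length ∧ PySem.Int.toStr (2 + (k : Int)) ∉ taken := by
  by_contra hc
  push Not at hc
  have hinj : Function.Injective (fun k : Nat => PySem.Int.toStr (2 + (k : Int))) := by
    intro a b hab
    have := pv_toStr_inj_nonneg _ _ (by omega) (by omega) hab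
    omega
  set l := (List.range (taken.length + 1)).map (fun k : Nat => PySem.Int.toStr (2 + (k : Int)))
    with hl
  have hndl : l.Nodup := List.Nodup.map hinj List.nodup_range
  have hsub : l.toFinset ⊆ taken.toFinset := by
    intro x hx
    rw [List.mem_toFinset] at hx ⊢
    obtain ⟨k, hk, rfl⟩ := List.mem_map.mp hx
    exact hc k (Nat.lt_succ_iff.mp (List.mem_range.mp hk))
  have hcard : l.toFinset.card = taken.length + 1 := by
    rw [List.toFinset_card_of_nodup hndl, hl]
    simp
  have h1 := Finset.card_le_card hsub
  have h2 := List.toFinset_card_le taken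
  omega

-- membership correspondence: a suffix string is taken iff prefix ++ suffix is a used name
lemma pv_mem_taken (used : PySem.Set String) (pre s : String) :
    s ∈ pvTakenSuffixes used pre ↔ pre ++ s ∈ used := by
  unfold pvTakenSuffixes
  rw [PySem.Set.mem_ofList, List.mem_map]
  constructor
  · rintro ⟨n, hn, rfl⟩
    obtain ⟨hnu, hsw⟩ := List.mem_filter.mp hn
    obtain ⟨t, ht⟩ := (PySem.Chars.startswith_iff _ _).mp (by simpa [PySem.Str.startswith_eq] using hsw)
    have hslice : (PySem.Str.slice n (some (PySem.Str.len pre)) none).toList = t := by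
      simp only [PySem.Str.toList_slice, PySem.Chars.slice_eq_listSlice, PySem.Str.len_eq]
      rw [PySem.List.slice_from_natCast, ← ht, List.drop_left]
    have : pre ++ PySem.Str.slice n (some (PySem.Str.len pre)) none = n := by
      apply String.toList_inj.mp
      rw [String.toList_append, hslice, ht]
    rw [this]
    exact hnu
  · intro hmem
    refine ⟨pre ++ s, List.mem_filter.mpr ⟨hmem, ?_⟩, ?_⟩
    · rw [PySem.Str.startswith_eq]
      exact (PySem.Chars.startswith_iff _ _).mpr ⟨s.toList, (String.toList_append).symm⟩
    · apply String.toList_inj.mp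
      simp only [PySem.Str.toList_slice, PySem.Chars.slice_eq_listSlice, PySem.Str.len_eq]
      rw [String.toList_append, PySem.List.slice_from_natCast, List.drop_left]

lemma pv_ofList_len {α : Type} [BEq α] [LawfulBEq α] [DecidableEq α] (xs : List α) :
    (PySem.Set.ofList xs).length ≤ xs.length := by
  have h1 : (PySem.Set.ofList xs).toFinset.card = (PySem.Set.ofList xs).length :=
    List.toFinset_card_of_nodup (PySem.Set.nodup_ofList xs)
  have h2 : (PySem.Set.ofList xs).toFinset ⊆ xs.toFinset := by
    intro x hx
    rw [List.mem_toFinset] at hx ⊢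
    exact (PySem.Set.mem_ofList xs x).mp hx
  have h3 := Finset.card_le_card h2
  have h4 := List.toFinset_card_le xs
  omega

lemma pv_taken_len (used : PySem.Set String) (pre : String) :
    (pvTakenSuffixes used pre).length ≤ used.length := by
  unfold pvTakenSuffixes
  calc (PySem.Set.ofList ((used.filter (fun n => PySem.Str.startswith n pre)).map
          (fun n => PySem.Str.slice n (some (PySem.Str.len pre)) none))).length
      ≤ ((used.filter (fun n => PySem.Str.startswith n pre)).map
          (fun n => PySem.Str.slice n (some (PySem.Str.len pre)) none)).length := pv_ofList_len _
    _ = (used.filter (fun n => PySem.Str.startswith n pre)).length := List.length_map ..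
    _ ≤ used.length := List.length_filter_le _ _

-- find? over range N returns the first index satisfying q
lemma pv_find_range (q : Nat → Bool) : ∀ (N k : Nat), k < N → q k = true →
    (∀ j, j < k → q j = false) → (List.range N).find? q = some k := by
  intro N
  induction N with
  | zero => intro k hk _ _; exact absurd hk (Nat.not_lt_zero k)
  | succ N ih =>
    intro k hk hq hmin
    by_cases hkN : k < N
    · rw [List.range_succ, List.find?_append, ih k hkN hq hmin]
      rfl
    · have hkeq : k = N := by omega
      subst hkeq
      have hnone : (List.range k).find? q = none := by
        rw [List.find?_eq_none]
        intro x hx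
        simp [hmin x (List.mem_range.mp hx)]
      rw [List.range_succ, List.find?_append, hnone]
      simp [List.find?, hq]

lemma pv_foldl_min (t : List Int) : ∀ x : Int, (∀ y ∈ t, x ≤ y) → t.foldl min x = x := by
  induction t with
  | nil => intro x _; rfl
  | cons a t ih =>
    intro x h
    simp only [List.foldl]
    rw [min_eq_left (h a (by simp))]
    exact ih x (fun y hy => h y (by simp [hy]))

-- A's while loop as find? over its candidate list (given a free candidate exists in it)
lemma pv_loop_eq (used : PySem.Set String) (obs : String) (idx : Int) :
    ∀ (F : Nat) (s : Int) (cand : String),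
      (∃ c ∈ cand :: (List.range F).map
          (fun k : Nat => obs ++ PySem.Int.toStr idx ++ "_" ++ PySem.Int.toStr (s + (k : Int))),
        c ∉ used) →
      pvLoopA used obs idx cand s F
        = ((cand :: (List.range F).map
              (fun k : Nat => obs ++ PySem.Int.toStr idx ++ "_" ++ PySem.Int.toStr (s + (k : Int)))).find?
            (fun c => !(PySem.Set.contains used c))).getD "" := by
  intro F
  induction F with
  | zero =>
    intro s cand H
    obtain ⟨c, hc, hfree⟩ := H
    simp only [List.range_zero, List.map_nil, List.mem_singleton] at hc
    subst hc
    have : PySem.Set.contains used c = false := by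
      rw [← Bool.not_eq_true, PySem.Set.contains_iff]; exact hfree
    simp [pvLoopA, List.find?, hfree]
  | succ F ihF =>
    intro s cand H
    by_cases hc : cand ∈ used
    · have hcb : PySem.Set.contains used cand = true := (PySem.Set.contains_iff _ _).mpr hc
      have hmaps : (List.range (F + 1)).map
            (fun k : Nat => obs ++ PySem.Int.toStr idx ++ "_" ++ PySem.Int.toStr (s + (k : Int)))
          = (obs ++ PySem.Int.toStr idx ++ "_" ++ PySem.Int.toStr s) ::
            (List.range F).map
              (fun k : Nat => obs ++ PySem.Int.toStr idx ++ "_" ++ PySem.Int.toStr ((s + 1) + (k : Int))) := by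
        rw [List.range_succ_eq_map, List.map_cons, List.map_map]
        simp only [Nat.cast_zero, add_zero]
        congr 1
        apply List.map_congr_left
        intro k _
        simp only [Function.comp_apply, Nat.succ_eq_add_one]
        congr 2
        push_cast
        ring
      have H' : ∃ c ∈ (obs ++ PySem.Int.toStr idx ++ "_" ++ PySem.Int.toStr s) ::
            (List.range F).map
              (fun k : Nat => obs ++ PySem.Int.toStr idx ++ "_" ++ PySem.Int.toStr ((s + 1) + (k : Int))),
          c ∉ used := by
        obtain ⟨c, hcm, hfree⟩ := H
        refine ⟨c, ?_, hfree⟩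
        rcases List.mem_cons.mp hcm with h | h
        · exact absurd (h ▸ hc) hfree
        · rw [← hmaps]; exact h
      have step1 : pvLoopA used obs idx cand s (F + 1)
          = pvLoopA used obs idx
              (obs ++ PySem.Int.toStr idx ++ "_" ++ PySem.Int.toStr s) (s + 1) F := by
        simp only [pvLoopA]
        rw [if_pos hcb]
      rw [step1, ihF (s + 1) _ H', hmaps,
        List.find?_cons_of_neg (a := cand) (by simp [hc])]
    · have hcb : PySem.Set.contains used cand = false := by
        rw [← Bool.not_eq_true, PySem.Set.contains_iff]; exact hc
      simp [pvLoopA, List.find?_cons_of_pos, Option.getD, hc]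

theorem pv_main_eq (obs : String) (idx : Int) (db : List (String × List (String × String))) :
    select_persisted_player_name obs idx db = select_persisted_player_name_alt obs idx db := by
  unfold select_persisted_player_name select_persisted_player_name_alt
  by_cases hs : pvIsSurvivorName obs = true
  · simp [hs]
  · simp only [hs, Bool.false_eq_true, if_false]
    set used := pvUsedNames db with hu
    by_cases hobs : obs ∈ used
    · have hobsb : PySem.Set.contains used obs = true := (PySem.Set.contains_iff _ _).mpr hobs
      rw [if_pos hobsb, if_neg (by simp [hobs])]
      by_cases hbase : (obs ++ PySem.Int.toStr idx) ∈ used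
      · have hbaseb : PySem.Set.contains used (obs ++ PySem.Int.toStr idx) = true :=
          (PySem.Set.contains_iff _ _).mpr hbase
        rw [if_neg (by simp [hbase])]
        -- main case: both obs and the indexed name are used
        set pre := obs ++ PySem.Int.toStr idx ++ "_" with hpre
        set taken := pvTakenSuffixes used pre with htk
        have hcat : ∀ t : String, obs ++ PySem.Int.toStr idx ++ "_" ++ t = pre ++ t := by
          intro t
          rw [hpre]
        have hEx : ∃ k : Nat, PySem.Int.toStr (2 + (k : Int)) ∉ taken := by
          obtain ⟨w, _, hw⟩ := pv_exists_free taken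
          exact ⟨w, hw⟩
        set kF := Nat.find hEx with hkF
        have hfree : PySem.Int.toStr (2 + (kF : Int)) ∉ taken := Nat.find_spec hEx
        have hkFle : kF ≤ taken.length := by
          obtain ⟨w, hw1, hw2⟩ := pv_exists_free taken
          exact le_trans (Nat.find_min' hEx hw2) hw1
        have htlen : taken.length ≤ used.length := pv_taken_len used pre
        have hminK : ∀ j : Nat, j < kF → PySem.Int.toStr (2 + (j : Int)) ∈ taken := by
          intro j hj
          exact not_not.mp (Nat.find_min hEx hj)
        have hmem : ∀ t : String, t ∈ taken ↔ pre ++ t ∈ used := fun t => pv_mem_taken used pre t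
        -- A side
        have hexA : ∃ c ∈ (obs ++ PySem.Int.toStr idx) :: (List.range (used.length + 2)).map
              (fun k : Nat => obs ++ PySem.Int.toStr idx ++ "_" ++ PySem.Int.toStr (2 + (k : Int))),
            c ∉ used := by
          refine ⟨obs ++ PySem.Int.toStr idx ++ "_" ++ PySem.Int.toStr (2 + (kF : Int)),
            List.mem_cons_of_mem _ (List.mem_map.mpr ⟨kF, List.mem_range.mpr (by omega), rfl⟩), ?_⟩
          rw [hcat]
          intro hin
          exact hfree ((hmem _).mpr hin)
        rw [pv_loop_eq used obs idx (used.length + 2) 2 _ hexA,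
          List.find?_cons_of_neg (a := obs ++ PySem.Int.toStr idx) (by simp [hbase]),
          List.find?_map]
        have hfindA : (List.range (used.length + 2)).find?
            ((fun c => !(PySem.Set.contains used c)) ∘
              (fun k : Nat => obs ++ PySem.Int.toStr idx ++ "_" ++ PySem.Int.toStr (2 + (k : Int))))
            = some kF := by
          apply pv_find_range _ _ _ (by omega)
          · simp only [Function.comp_apply, hcat, Bool.not_eq_true']
            rw [← Bool.not_eq_true, PySem.Set.contains_iff]
            exact fun hin => hfree ((hmem _).mpr hin)
          · intro j hj
            simp only [Function.comp_apply, hcat]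
            rw [(PySem.Set.contains_iff _ _).mpr ((hmem _).mp (hminK j hj))]
            rfl
        rw [hfindA]
        -- B side
        have hrange : PySem.List.pyRange 2 (PySem.Set.len taken + 3) 1
            = (List.range (taken.length + 1)).map (fun k : Nat => 2 + (k : Int)) := by
          rw [PySem.Set.len, PySem.List.pyRange_one]
          have h2 : (((taken.length : Int)) + 3 - 2).toNat = taken.length + 1 := by omega
          rw [h2]
        rw [hrange, List.filter_map]
        have hfindB : (List.range (taken.length + 1)).find?
            ((fun s => !(PySem.Set.contains taken (PySem.Int.toStr s))) ∘ (fun k : Nat => 2 + (k : Int)))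
            = some kF := by
          apply pv_find_range _ _ _ (by omega)
          · simp only [Function.comp_apply, Bool.not_eq_true']
            rw [← Bool.not_eq_true, PySem.Set.contains_iff]
            exact hfree
          · intro j hj
            simp only [Function.comp_apply]
            rw [(PySem.Set.contains_iff _ _).mpr (hminK j hj)]
            rfl
        have hhead : ((List.range (taken.length + 1)).filter
            ((fun s => !(PySem.Set.contains taken (PySem.Int.toStr s))) ∘ (fun k : Nat => 2 + (k : Int)))).head?
            = some kF := by
          rw [List.head?_filter, hfindB]
        obtain ⟨t', ht'⟩ := List.head?_eq_some_iff.mp hhead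
        have hpw : ∀ j ∈ t', kF < j := by
          have := List.Pairwise.sublist (List.filter_sublist
            (l := List.range (taken.length + 1))
            (p := (fun s => !(PySem.Set.contains taken (PySem.Int.toStr s))) ∘ (fun k : Nat => 2 + (k : Int))))
            List.pairwise_lt_range
          rw [ht'] at this
          exact (List.pairwise_cons.mp this).1
        rw [ht', List.map_cons, PySem.List.min?_id_cons]
        have hfold : ((t'.map (fun k : Nat => 2 + (k : Int))).foldl min (2 + (kF : Int)))
            = 2 + (kF : Int) := by
          apply pv_foldl_min
          intro y hy
          obtain ⟨j, hj, rfl⟩ := List.mem_map.mp hy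
          have := hpw j hj
          omega
        rw [hfold]
        simp only [Option.getD_some, Option.map_some]
        rw [hcat]
      · have hbaseb : PySem.Set.contains used (obs ++ PySem.Int.toStr idx) = false := by
          rw [← Bool.not_eq_true, PySem.Set.contains_iff]; exact hbase
        rw [if_pos (by simp [hbase])]
        have hfuel : used.length + 2 = (used.length + 1) + 1 := rfl
        rw [hfuel]
        simp only [pvLoopA]
        rw [if_neg (by simp [hbase])]
    · have hobsb : PySem.Set.contains used obs = false := by
        rw [← Bool.not_eq_true, PySem.Set.contains_iff]; exact hobs
      rw [if_neg (by simp [hobs]), if_pos (by simp [hobs])]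
      have hfuel : used.length + 2 = (used.length + 1) + 1 := rfl
      rw [hfuel]
      simp only [pvLoopA]
      rw [if_neg (by simp [hobs])]

-- ===== VERDICT (by name: the statement is the Claim_ definition above) =====
theorem select_persisted_player_name_spec : Claim_equal_select_persisted_player_name := by
  intro observed_name player_index players_db _
  unfold Spec_select_persisted_player_name
  exact pv_main_eq observed_name player_index players_db
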